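-- pv_equiv track=rewrite | github.com/Jatin0804/Youtube-adview-Prediction | Adview prediction tests.py | check
-- ===== SOURCE A (Python) =====
-- def check(x):
--     year = x[2:]
--     hours = ''
--     minutes = ''
--     seconds = ''
--     mm = ''
--     P = ["H", "M", "S"]
--     for i in year:
--         if i not in P:
--             mm += i
--         else:
--             if i == "H":
--                 hours = mm
--                 mm = ''
--             elif i == "M":
--                 minutes = mm
--                 mm = ''
--             else:
--                 seconds = mm
--                 mm = ''
--     if hours == '':
--         hours = '00'
--     if minutes == '':
--         minutes = '00'
--     if seconds == '':
--         seconds = '00'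
--     bp = hours + ":" + minutes + ":" + seconds
--     return bp
-- ===== SOURCE B (Python) =====
-- def check(x):
--     rest = x[2:]
--     h = m = s = ''
--     while rest:
--         j = 0
--         while j < len(rest) and rest[j] not in 'HMS':
--             j += 1
--         if j == len(rest):
--             break
--         buf = rest[:j]
--         if rest[j] == 'H':
--             h = buf
--         elif rest[j] == 'M':
--             m = buf
--         else:
--             s = buf
--         rest = rest[j + 1:]
--     return (h or '00') + ':' + (m or '00') + ':' + (s or '00')
-- ===== Notes on version B (the rewrite author's own statement) =====
-- stated objective: alternative
-- what changed: Replaces A's per-character state machine with an accumulator buffer by a tokenizer that repeatedly scans to the next H/M/S separator and slices the buffer out of the string.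
import Mathlib
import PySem

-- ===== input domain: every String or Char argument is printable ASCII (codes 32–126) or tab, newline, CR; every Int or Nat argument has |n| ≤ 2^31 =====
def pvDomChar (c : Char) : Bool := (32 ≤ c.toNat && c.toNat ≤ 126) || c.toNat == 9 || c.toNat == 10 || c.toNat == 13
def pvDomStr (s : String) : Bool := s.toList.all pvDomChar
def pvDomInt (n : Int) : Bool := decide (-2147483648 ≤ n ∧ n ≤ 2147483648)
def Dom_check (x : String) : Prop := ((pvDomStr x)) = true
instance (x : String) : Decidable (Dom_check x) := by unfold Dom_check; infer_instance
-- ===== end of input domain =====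

-- B replaces A's per-character accumulator state machine by a tokenizer that scans to the
-- next H/M/S separator and slices the buffer out; alternative algorithm, same cost.

-- ===== PORT A =====
-- A's per-character loop over year = x[2:], state (hours, minutes, seconds, mm).
def aLoop : List Char → List Char → List Char → List Char → List Char → List Char × List Char × List Char
  | [], h, m, s, _ => (h, m, s)
  | c :: cs, h, m, s, mm =>
    if ¬ (c = 'H' ∨ c = 'M' ∨ c = 'S') then aLoop cs h m s (mm ++ [c])
    else if c = 'H' then aLoop cs mm m s []
    else if c = 'M' then aLoop cs h mm s []
    else aLoop cs h m mm []

-- if field == '': field = '00'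
def aDflt (l : List Char) : List Char := if l = [] then ['0', '0'] else l

def check (x : String) : String :=
  -- x[2:] with a nonnegative literal start index is exactly `drop 2` (exact)
  let r := aLoop (x.toList.drop 2) [] [] [] []
  String.ofList (aDflt r.1 ++ ':' :: aDflt r.2.1 ++ ':' :: aDflt r.2.2)

-- ===== PORT B =====
-- rest[j] in 'HMS'
def bSep (c : Char) : Bool := c = 'H' || c = 'M' || c = 'S'

-- (field or '00')
def bDflt (l : List Char) : List Char := if l = [] then ['0', '0'] else l

-- B's outer while loop; the inner index scan `while j < len(rest) and rest[j] not in 'HMS'`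
-- is exactly List.findIdx bSep (which returns the length when no separator is found).
def bLoop : List Char → List Char → List Char → List Char → List Char × List Char × List Char
  | [], h, m, s => (h, m, s)
  | c :: cs, h, m, s =>
    let rest := c :: cs
    let j := rest.findIdx bSep
    if j = rest.length then (h, m, s)
    else
      let buf := rest.take j
      -- rest[j]: in range here since j ≠ len(rest) and findIdx ≤ length
      let u := rest.getD j ' '
      if u = 'H' then bLoop (rest.drop (j + 1)) buf m s
      else if u = 'M' then bLoop (rest.drop (j + 1)) h buf s
      else bLoop (rest.drop (j + 1)) h m buf
  termination_by cs _ _ _ => cs.length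
  decreasing_by all_goals simp [List.length_drop]

def check_alt (x : String) : String :=
  let r := bLoop (x.toList.drop 2) [] [] [] -- rest = x[2:]
  String.ofList (bDflt r.1 ++ ':' :: bDflt r.2.1 ++ ':' :: bDflt r.2.2)

-- ===== PRECONDITION & SPEC =====
def Spec_check (x : String) (out : String) : Prop := out = check_alt x
instance (x : String) (out : String) : Decidable (Spec_check x out) := by unfold Spec_check; infer_instance

-- ===== CLAIM (what is proved, stated in full; the proofs are below) =====
def Claim_equal_check : Prop := ∀ (x : String), Dom_check x → Spec_check x (check x)

-- ===== LEMMAS AND PROOFS =====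

theorem aLoop_absorb (buf : List Char) (hbuf : ∀ c ∈ buf, bSep c = false) :
    ∀ (cs h m s mm : List Char), aLoop (buf ++ cs) h m s mm = aLoop cs h m s (mm ++ buf) := by
  induction buf with
  | nil => intro cs h m s mm; simp
  | cons c buf ih =>
    intro cs h m s mm
    have hc : bSep c = false := hbuf c (by simp)
    have hc' : ¬ (c = 'H' ∨ c = 'M' ∨ c = 'S') := by
      simp [bSep] at hc; tauto
    simp only [List.cons_append, aLoop, if_pos hc']
    rw [ih (fun d hd => hbuf d (by simp [hd]))]
    simp

theorem take_findIdx (cs : List Char) :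
    cs.take (cs.findIdx bSep) = cs.takeWhile (fun c => !bSep c) := by
  induction cs with
  | nil => simp
  | cons c cs ih =>
    by_cases hc : bSep c
    · simp [List.findIdx_cons, hc]
    · simp [List.findIdx_cons, hc, ih]

theorem drop_findIdx (cs : List Char) :
    cs.drop (cs.findIdx bSep) = cs.dropWhile (fun c => !bSep c) := by
  induction cs with
  | nil => simp
  | cons c cs ih =>
    by_cases hc : bSep c
    · simp [List.findIdx_cons, hc]
    · simp [List.findIdx_cons, hc, ih]

theorem main_lemma : ∀ (n : ℕ) (cs : List Char), cs.length ≤ n →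
    ∀ (h m s : List Char), aLoop cs h m s [] = bLoop cs h m s := by
  intro n
  induction n with
  | zero =>
    intro cs hcs h m s
    have : cs = [] := List.eq_nil_of_length_eq_zero (Nat.le_zero.mp hcs)
    subst this; simp [aLoop, bLoop]
  | succ n ih =>
    intro cs hcs h m s
    match cs with
    | [] => simp [aLoop, bLoop]
    | c :: cs' =>
      set j := (c :: cs').findIdx bSep with hj
      have htw : ∀ d ∈ (c :: cs').takeWhile (fun c => !bSep c), bSep d = false := by
        intro d hd; simpa using List.mem_takeWhile_imp hd
      have hsplit := (List.takeWhile_append_dropWhile (p := fun c => !bSep c) (l := c :: cs'))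
      have habs := aLoop_absorb _ htw ((c :: cs').dropWhile (fun c => !bSep c)) h m s []
      by_cases hlen : j = (c :: cs').length
      · have hdw : (c :: cs').dropWhile (fun c => !bSep c) = [] := by
          rw [← drop_findIdx, ← hj, hlen]; simp
        have ha : aLoop (c :: cs') h m s [] = (h, m, s) := by
          conv_lhs => rw [← hsplit]
          rw [habs, hdw]; rfl
        have hb : bLoop (c :: cs') h m s = (h, m, s) := by
          rw [bLoop]
          simp only [← hj, if_pos hlen]
        rw [ha, hb]
      · have hjlt : j < (c :: cs').length := lt_of_le_of_ne (List.findIdx_le_length) hlen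
        have hd : bSep ((c :: cs')[j]'hjlt) = true := List.findIdx_getElem
        have hcons : (c :: cs')[j]'hjlt :: (c :: cs').drop (j + 1) = (c :: cs').drop j :=
          List.getElem_cons_drop hjlt
        have hdw : (c :: cs').dropWhile (fun c => !bSep c)
            = (c :: cs')[j]'hjlt :: (c :: cs').drop (j + 1) := by
          rw [hcons, hj]; exact (drop_findIdx _).symm
        have htk : (c :: cs').takeWhile (fun c => !bSep c) = (c :: cs').take j := by
          rw [hj]; exact (take_findIdx _).symm
        have hlen' : ((c :: cs').drop (j + 1)).length ≤ n := by
          simp at hcs ⊢; omega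
        have hIH := fun h m s => ih ((c :: cs').drop (j + 1)) hlen' h m s
        have hgd : (c :: cs').getD j ' ' = (c :: cs')[j]'hjlt := by
          simp [List.getD, List.getElem?_eq_getElem hjlt]
        have hb : bLoop (c :: cs') h m s =
            (if (c :: cs')[j]'hjlt = 'H' then
              bLoop ((c :: cs').drop (j + 1)) ((c :: cs').take j) m s
            else if (c :: cs')[j]'hjlt = 'M' then
              bLoop ((c :: cs').drop (j + 1)) h ((c :: cs').take j) s
            else bLoop ((c :: cs').drop (j + 1)) h m ((c :: cs').take j)) := by
          rw [bLoop]
          simp only [← hj, if_neg hlen, hgd]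
        have ha : aLoop (c :: cs') h m s [] =
            aLoop ((c :: cs')[j]'hjlt :: (c :: cs').drop (j + 1)) h m s ((c :: cs').take j) := by
          conv_lhs => rw [← hsplit]
          rw [habs, hdw, htk]; simp
        rw [ha, hb]
        have hP : ¬ ¬ ((c :: cs')[j]'hjlt = 'H' ∨ (c :: cs')[j]'hjlt = 'M' ∨ (c :: cs')[j]'hjlt = 'S') := by
          simp [bSep] at hd; tauto
        rw [aLoop, if_neg hP]
        by_cases h1 : (c :: cs')[j]'hjlt = 'H'
        · rw [if_pos h1, if_pos h1, hIH]
        · rw [if_neg h1, if_neg h1]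
          by_cases h2 : (c :: cs')[j]'hjlt = 'M'
          · rw [if_pos h2, if_pos h2, hIH]
          · rw [if_neg h2, if_neg h2, hIH]

theorem check_eq_alt (x : String) : check x = check_alt x := by
  have h := main_lemma (x.toList.drop 2).length (x.toList.drop 2) le_rfl [] [] []
  simp only [check, check_alt, h, aDflt, bDflt]

-- ===== VERDICT (by name: the statement is the Claim_ definition above) =====
theorem check_spec : Claim_equal_check := by
  intro x _
  unfold Spec_check
  exact check_eq_alt x
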